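-- pv_equiv track=rewrite | github.com/Hackathon-GJU-2026/Hackathon_Team_10_Serene_Scheduler | backend/app.py | slot_blocks_order
-- ===== SOURCE A (Python) =====
-- def slot_blocks_order(data, duration=2):
--     slots = data["slots"]
--     blocks = []
--     if duration <= 1:
--         return [[s] for s in slots if s != "Lunch Break"]
--     for i in range(len(slots) - duration + 1):
--         candidate = slots[i:i + duration]
--         # Never allow a single lab block to cross lunch.
--         if "Lunch Break" in candidate:
--             continue
--         blocks.append(candidate)
--     # Prefer earlier contiguous blocks first.
--     return blocks
-- ===== SOURCE B (Python) =====
-- def slot_blocks_order(data, duration=2):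
--     slots = data["slots"]
--     if duration <= 1:
--         return [[s] for s in slots if s != "Lunch Break"]
--     blocks = []
--     seg = []
--     # One scan: flush each maximal contiguous non-lunch segment at its end
--     # (a sentinel "Lunch Break" flushes the final segment), emitting every
--     # window of the given length inside the segment.
--     for s in slots + ["Lunch Break"]:
--         if s == "Lunch Break":
--             for j in range(len(seg) - duration + 1):
--                 blocks.append(seg[j:j + duration])
--             seg = []
--         else:
--             seg.append(s)
--     return blocks
-- ===== Notes on version B (the rewrite author's own statement) =====
-- stated objective: alternative
-- what changed: B makes a single scan that partitions slots into maximal contiguous non-'Lunch Break' segments (flushed via a sentinel) and emits every fixed-length window inside each segment, instead of sliding a window over the whole list and testing each candidate for 'Lunch Break'.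
import Mathlib
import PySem

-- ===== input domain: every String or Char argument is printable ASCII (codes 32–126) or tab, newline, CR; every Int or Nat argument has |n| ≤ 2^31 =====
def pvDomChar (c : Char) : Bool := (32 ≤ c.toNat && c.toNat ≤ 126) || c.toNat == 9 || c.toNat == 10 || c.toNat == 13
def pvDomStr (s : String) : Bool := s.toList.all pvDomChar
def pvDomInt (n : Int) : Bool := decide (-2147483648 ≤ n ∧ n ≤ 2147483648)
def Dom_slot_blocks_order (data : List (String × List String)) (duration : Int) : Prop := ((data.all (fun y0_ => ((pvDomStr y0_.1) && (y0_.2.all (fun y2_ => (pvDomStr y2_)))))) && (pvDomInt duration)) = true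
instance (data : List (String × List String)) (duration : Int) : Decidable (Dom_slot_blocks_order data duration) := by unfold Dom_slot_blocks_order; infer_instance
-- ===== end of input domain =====

-- B replaces A's per-window 'Lunch Break' membership test by a single scan into maximal
-- contiguous non-lunch segments, emitting every window inside each segment (objective: alternative).

-- ===== PORT A =====
def slot_blocks_order (data : List (String × List String)) (duration : Int) : List (List String) :=
  let slots := (PySem.Dict.get? (PySem.Dict.mk data) "slots").getD []   -- data["slots"]; KeyError (key absent) is excluded by Pre_
  if duration ≤ 1 then
    (slots.filter (fun s => s != "Lunch Break")).map (fun s => [s])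
  else
    (PySem.List.pyRange 0 ((slots.length : Int) - duration + 1) 1).foldl
      (fun blocks i =>
        let candidate := PySem.List.slice slots (some i) (some (i + duration))
        if "Lunch Break" ∈ candidate then blocks else blocks ++ [candidate]) []

-- ===== PORT B =====
-- inner loop of Source B: for j in range(len(seg) - duration + 1): blocks.append(seg[j:j+duration])
def sboFlush (duration : Int) (blocks : List (List String)) (seg : List String) : List (List String) :=
  (PySem.List.pyRange 0 ((seg.length : Int) - duration + 1) 1).foldl
    (fun blocks j => blocks ++ [PySem.List.slice seg (some j) (some (j + duration))]) blocks

-- loop body of Source B's scan; state = (blocks, seg)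
def sboStep (duration : Int) (st : List (List String) × List String) (s : String) :
    List (List String) × List String :=
  if s = "Lunch Break" then (sboFlush duration st.1 st.2, [])
  else (st.1, st.2 ++ [s])

def slot_blocks_order_alt (data : List (String × List String)) (duration : Int) : List (List String) :=
  let slots := (PySem.Dict.get? (PySem.Dict.mk data) "slots").getD []   -- data["slots"]; KeyError (key absent) is excluded by Pre_
  if duration ≤ 1 then
    (slots.filter (fun s => s != "Lunch Break")).map (fun s => [s])
  else
    ((slots ++ ["Lunch Break"]).foldl (sboStep duration) ([], [])).1

-- ===== PRECONDITION & SPEC =====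
-- Pre_ excludes only the inputs where A raises KeyError: dicts without a "slots" key.
def Pre_slot_blocks_order (data : List (String × List String)) (_duration : Int) : Prop :=
  (PySem.Dict.get? (PySem.Dict.mk data) "slots").isSome = true
instance (data : List (String × List String)) (duration : Int) : Decidable (Pre_slot_blocks_order data duration) := by
  unfold Pre_slot_blocks_order; infer_instance
def pvWitness_slot_blocks_order : (List (String × List String)) × Int :=
  ([("slots", ["Mon 9", "Mon 10", "Lunch Break", "Mon 12"])], 2)

def Spec_slot_blocks_order (data : List (String × List String)) (duration : Int) (out : List (List String)) : Prop := out = slot_blocks_order_alt data duration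
instance (data : List (String × List String)) (duration : Int) (out : List (List String)) : Decidable (Spec_slot_blocks_order data duration out) := by unfold Spec_slot_blocks_order; infer_instance

-- ===== CLAIM (what is proved, stated in full; the proofs are below) =====
def Claim_equal_slot_blocks_order : Prop := ∀ (data : List (String × List String)) (duration : Int), Dom_slot_blocks_order data duration → Pre_slot_blocks_order data duration → Spec_slot_blocks_order data duration (slot_blocks_order data duration)

-- ===== LEMMAS AND PROOFS =====

-- all full-length windows of l that avoid "Lunch Break", left to right (A's loop, index-free)
def pvW (d : Nat) : List String → List (List String)
  | [] => []
  | a :: t =>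
      (if d ≤ t.length + 1 ∧ "Lunch Break" ∉ (a :: t).take d then [(a :: t).take d] else []) ++ pvW d t

-- all windows of length d of l (B's flush of one segment, index-free)
def pvWin (d : Nat) (l : List String) : List (List String) :=
  (List.range (l.length + 1 - d)).map (fun j => (l.drop j).take d)

-- A's loop as filter-then-map over the index range
def pvC (d : Nat) (l : List String) : List (List String) :=
  ((List.range (l.length + 1 - d)).filter
      (fun k => decide ("Lunch Break" ∉ (l.drop k).take d))).map (fun k => (l.drop k).take d)

lemma pv_toNat (n d : Nat) : ((n : Int) - (d : Int) + 1).toNat = n + 1 - d := by omega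

lemma pv_foldl_skip (F : Nat → List String) :
    ∀ (l : List Nat) (acc : List (List String)),
      List.foldl (fun acc k => if "Lunch Break" ∈ F k then acc else acc ++ [F k]) acc l
        = acc ++ (l.filter (fun k => decide ("Lunch Break" ∉ F k))).map F := by
  intro l
  induction l with
  | nil => intro acc; simp
  | cons k l ih =>
    intro acc
    by_cases h : "Lunch Break" ∈ F k <;> simp [h, ih]

lemma pvW_short (d : Nat) : ∀ (l : List String), l.length < d → pvW d l = [] := by
  intro l
  induction l with
  | nil => intro _; rfl
  | cons a t ih =>
    intro h
    simp only [List.length_cons] at h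
    simp only [pvW, ih (by omega), List.append_nil]
    split
    · next hc => exact absurd hc.1 (by omega)
    · rfl

lemma pvC_eq_pvW (d : Nat) (hd : 1 ≤ d) : ∀ (l : List String), pvC d l = pvW d l := by
  intro l
  induction l with
  | nil =>
    simp [pvC, pvW, (by omega : 0 + 1 - d = 0)]
  | cons a t ih =>
    by_cases hle : d ≤ t.length + 1
    · have hr : (a :: t).length + 1 - d = (t.length + 1 - d) + 1 := by
        simp only [List.length_cons]; omega
      by_cases hm : "Lunch Break" ∈ (a :: t).take d
      · simp [pvC, pvW, hr, List.range_succ_eq_map, hm, hle,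
          List.filter_map, List.map_map, Function.comp_def] at *
        exact ih
      · simp [pvC, pvW, hr, List.range_succ_eq_map, hm, hle,
          List.filter_map, List.map_map, Function.comp_def] at *
        exact ih
    · have h0 : t.length + 1 + 1 - d = 0 := by omega
      simp [pvC, pvW, h0, hle, pvW_short d t (by omega)]

lemma pvWin_cons (d : Nat) (a : String) (s : List String) :
    pvWin d (a :: s) = (if d ≤ s.length + 1 then [(a :: s).take d] else []) ++ pvWin d s := by
  by_cases hle : d ≤ s.length + 1
  · have hr : s.length + 1 + 1 - d = (s.length + 1 - d) + 1 := by omega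
    simp [pvWin, hr, List.range_succ_eq_map, hle, List.map_map, Function.comp_def,
      Nat.succ_eq_add_one]
  · have h0 : s.length + 1 + 1 - d = 0 := by omega
    have h1 : s.length + 1 - d = 0 := by omega
    simp [pvWin, h0, h1, hle]

lemma pvW_lunchfree (d : Nat) (hd : 1 ≤ d) :
    ∀ (s : List String), "Lunch Break" ∉ s → pvW d s = pvWin d s := by
  intro s
  induction s with
  | nil => intro _; simp [pvW, pvWin, (by omega : 0 + 1 - d = 0)]
  | cons a t ih =>
    intro h
    have hnt : "Lunch Break" ∉ (a :: t).take d := fun hm => h (List.mem_of_mem_take hm)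
    rw [pvW, pvWin_cons d, ih (fun hm => h (List.mem_cons_of_mem a hm))]
    congr 1
    by_cases hle : d ≤ t.length + 1 <;> simp [hle, hnt]

lemma pvW_append_lunch (d : Nat) (hd : 1 ≤ d) :
    ∀ (s t : List String), "Lunch Break" ∉ s →
      pvW d (s ++ "Lunch Break" :: t) = pvWin d s ++ pvW d t := by
  intro s
  induction s with
  | nil =>
    intro t _
    obtain ⟨m, rfl⟩ : ∃ m, d = m + 1 := ⟨d - 1, by omega⟩
    simp [pvW, pvWin, List.take_succ_cons]
  | cons a s ih =>
    intro t h
    have hs : "Lunch Break" ∉ s := fun hm => h (List.mem_cons_of_mem a hm)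
    rw [List.cons_append, pvW, ih t hs, pvWin_cons d]
    by_cases hle : d ≤ s.length + 1
    · have htk : (a :: (s ++ "Lunch Break" :: t)).take d = (a :: s).take d := by
        rw [← List.cons_append]
        exact List.take_append_of_le_length (by simp only [List.length_cons]; omega)
      have hnt : "Lunch Break" ∉ (a :: (s ++ "Lunch Break" :: t)).take d := by
        rw [htk]; exact fun hm => h (List.mem_of_mem_take hm)
      have hlen : d ≤ s.length + (t.length + 1) + 1 := by omega
      have hnt2 : "Lunch Break" ∉ (a :: s).take d := by rw [htk] at hnt; exact hnt
      simp [hle, hlen, hnt2, htk]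
    · have hm : "Lunch Break" ∈ (a :: (s ++ "Lunch Break" :: t)).take d := by
        have heq : (a :: (s ++ "Lunch Break" :: t)).take d
            = (a :: s) ++ ("Lunch Break" :: t).take (d - (s.length + 1)) := by
          rw [← List.cons_append, List.take_append]
          congr 1
          exact List.take_of_length_le (by simp only [List.length_cons]; omega)
        rw [heq]
        obtain ⟨m, hm⟩ : ∃ m, d - (s.length + 1) = m + 1 :=
          ⟨d - (s.length + 1) - 1, by omega⟩
        rw [hm, List.take_succ_cons]
        simp
      simp [hle, hm]

lemma sboFlush_eq (d : Nat) (blocks : List (List String)) (seg : List String) :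
    sboFlush (d : Int) blocks seg = blocks ++ pvWin d seg := by
  rw [sboFlush, PySem.List.pyRange_one, List.foldl_map]
  simp only [sub_zero, zero_add, pv_toNat, PySem.List.slice_natCast_add]
  rw [PySem.List.foldl_append_singleton_eq_map]
  rfl

lemma pvB_fold (d : Nat) (hd : 1 ≤ d) :
    ∀ (r seg : List String) (blocks : List (List String)), "Lunch Break" ∉ seg →
      ((r ++ ["Lunch Break"]).foldl (sboStep (d : Int)) (blocks, seg)).1
        = blocks ++ pvW d (seg ++ r) := by
  intro r
  induction r with
  | nil =>
    intro seg blocks h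
    simp [sboStep, sboFlush_eq, pvW_lunchfree d hd seg h]
  | cons s r ih =>
    intro seg blocks h
    by_cases hs : s = "Lunch Break"
    · subst hs
      rw [List.cons_append, List.foldl_cons]
      have : sboStep (d : Int) (blocks, seg) "Lunch Break"
          = (blocks ++ pvWin d seg, []) := by simp [sboStep, sboFlush_eq]
      rw [this, ih [] (blocks ++ pvWin d seg) (by simp)]
      simp [pvW_append_lunch d hd seg r h]
    · rw [List.cons_append, List.foldl_cons]
      have : sboStep (d : Int) (blocks, seg) s = (blocks, seg ++ [s]) := by
        simp [sboStep, hs]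
      rw [this, ih (seg ++ [s]) blocks (by simp [h]; exact fun e => hs e.symm)]
      simp

lemma pvA_loop (d : Nat) (l : List String) :
    (PySem.List.pyRange 0 ((l.length : Int) - (d : Int) + 1) 1).foldl
        (fun blocks i =>
          let candidate := PySem.List.slice l (some i) (some (i + (d : Int)))
          if "Lunch Break" ∈ candidate then blocks else blocks ++ [candidate]) []
      = pvC d l := by
  rw [PySem.List.pyRange_one, List.foldl_map]
  simp only [sub_zero, zero_add, pv_toNat, PySem.List.slice_natCast_add]
  rw [pv_foldl_skip (fun k => (l.drop k).take d)]
  rfl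

-- ===== VERDICT (by name: the statement is the Claim_ definition above) =====
theorem slot_blocks_order_spec : Claim_equal_slot_blocks_order := by
  intro data duration _ _
  unfold Spec_slot_blocks_order slot_blocks_order slot_blocks_order_alt
  by_cases h1 : duration ≤ 1
  · simp [h1]
  · simp only [h1, if_false]
    obtain ⟨d, rfl⟩ : ∃ d : Nat, duration = (d : Int) :=
      ⟨duration.toNat, (Int.toNat_of_nonneg (by omega)).symm⟩
    have hd : 1 ≤ d := by omega
    rw [pvA_loop d, pvC_eq_pvW d hd,
      pvB_fold d hd ((PySem.Dict.get? (PySem.Dict.mk data) "slots").getD []) [] [] (by simp)]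
    simp
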